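-- pv_equiv track=rewrite | github.com/kimhw99/University | CSC3050 - Computer Architecture/Assignment 2/simulator.py | decSign
-- ===== SOURCE A (Python) =====
-- def decSign(a,n): #decimal a to signed binary with n bits
--     b = abs(a)
--
--     if a!=b:
--         b=bin(b-1)[2:]
--         b=b.replace('1','2')
--         b=b.replace('0','1')
--         b=b.replace('2','0')
--         while len(b)!=n:
--             b='1'+b
--
--     elif a==b:
--         b=bin(b)[2:]
--         while len(b)!=n:
--             b='0'+b
--
--     return b
-- ===== SOURCE B (Python) =====
-- def decSign(a, n):  # decimal a to signed binary with n bits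
--     value = a if a >= 0 else (1 << n) + a
--     return format(value, '0{}b'.format(n))
-- ===== Notes on version B (the rewrite author's own statement) =====
-- stated objective: faster
-- what changed: Replaces A's branch on sign with bin()+string-replace bit inversion and a one-char-at-a-time padding loop by one arithmetic reduction to the two's-complement value (1 << n) + a followed by a single zero-padded binary format call.
import Mathlib
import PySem

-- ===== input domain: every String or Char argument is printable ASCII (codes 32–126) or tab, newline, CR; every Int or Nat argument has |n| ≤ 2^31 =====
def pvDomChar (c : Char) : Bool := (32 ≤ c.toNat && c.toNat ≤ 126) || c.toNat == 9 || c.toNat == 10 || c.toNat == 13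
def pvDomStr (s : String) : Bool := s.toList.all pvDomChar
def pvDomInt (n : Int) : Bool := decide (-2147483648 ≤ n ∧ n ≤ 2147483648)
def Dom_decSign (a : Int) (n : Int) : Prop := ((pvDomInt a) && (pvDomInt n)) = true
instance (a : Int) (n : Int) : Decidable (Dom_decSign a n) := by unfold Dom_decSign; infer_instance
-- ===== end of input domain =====

-- B replaces A's sign branch with bin()+replace inversion and a char-by-char padding loop by
-- one arithmetic reduction to the two's-complement value (1 << n) + a plus a single
-- zero-padded binary format; a timing run measures whether that is faster.


-- ===== PORT A =====
-- bin(m)[2:] for m ≥ 0 (exact: CPython's bin without the '0b' prefix; bin(0)[2:] = "0")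
def binCore (m : Nat) : List Char :=
  if m = 0 then [] else binCore (m / 2) ++ [if m % 2 = 1 then '1' else '0']
decreasing_by exact Nat.div_lt_self (Nat.pos_of_ne_zero (by assumption)) (by omega)

def binDigits (m : Nat) : List Char := if m = 0 then ['0'] else binCore m

-- the while-loop "while len(b)!=n: b = c+b"; the guard '<' makes it total where
-- Python diverges (len > n: prepending never reaches n), identical where Python returns
def padLoop (c : Char) (n : Int) (s : List Char) : List Char :=
  if (s.length : Int) < n then padLoop c n (c :: s) else s
termination_by (n - s.length).toNat
decreasing_by simp only [List.length_cons]; omega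

def decSign (a : Int) (n : Int) : String :=
  let b := a.natAbs                                   -- b = abs(a)
  if a ≠ (b : Int) then
    let s1 := String.ofList (binDigits (b - 1))       -- b = bin(b-1)[2:]
    let s2 := PySem.Str.replace s1 "1" "2"
    let s3 := PySem.Str.replace s2 "0" "1"
    let s4 := PySem.Str.replace s3 "2" "0"
    String.ofList (padLoop '1' n s4.toList)
  else
    String.ofList (padLoop '0' n (binDigits b))

-- ===== PORT B =====
-- format(value, '0{}b'.format(n)) for any int value: the signed binary digit string of value,
-- zero-filled to width n (zfill keeps a leading sign in front, exactly Python's '0Nb' padding)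
def pyFormatBin (value : Int) (n : Int) : String :=
  PySem.Str.zfill
    (String.ofList (if value < 0 then '-' :: binDigits value.natAbs else binDigits value.toNat)) n

def decSign_alt (a : Int) (n : Int) : String :=
  let value : Int := if a ≥ 0 then a else 2 ^ n.toNat + a   -- (1 << n) + a
  pyFormatBin value n

-- ===== PRECONDITION & SPEC =====
-- A's padding loops terminate only when the value fits in n bits (n ≥ 1,
-- -2^n ≤ a < 2^n); outside this A loops forever (returns nothing), so nothing is excluded
-- on which A returns.
def Pre_decSign (a : Int) (n : Int) : Prop :=
  1 ≤ n ∧ -(2 ^ n.toNat) ≤ a ∧ a < 2 ^ n.toNat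
instance (a : Int) (n : Int) : Decidable (Pre_decSign a n) := by unfold Pre_decSign; infer_instance
def pvWitness_decSign : Int × Int := (-3, 4)

def Spec_decSign (a : Int) (n : Int) (out : String) : Prop := out = decSign_alt a n
instance (a : Int) (n : Int) (out : String) : Decidable (Spec_decSign a n out) := by
  unfold Spec_decSign; infer_instance

-- ===== CLAIM (what is proved, stated in full; the proofs are below) =====
def Claim_equal_decSign : Prop :=
  ∀ (a : Int) (n : Int), Dom_decSign a n → Pre_decSign a n → Spec_decSign a n (decSign a n)

-- ===== LEMMAS AND PROOFS =====

-- the low k bits of v, most significant first: the common normal form of both programs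
def bits : Nat → Nat → List Char
  | 0, _ => []
  | k + 1, v => bits k (v / 2) ++ [if v % 2 = 1 then '1' else '0']

theorem length_bits (k v : Nat) : (bits k v).length = k := by
  induction k generalizing v with
  | zero => rfl
  | succ k ih => simp [bits, ih]

theorem mem_bits {c : Char} {k v : Nat} (h : c ∈ bits k v) : c = '0' ∨ c = '1' := by
  induction k generalizing v with
  | zero => simp [bits] at h
  | succ k ih =>
    simp only [bits, List.mem_append, List.mem_singleton] at h
    rcases h with h | h
    · exact ih h
    · subst h; split <;> simp

theorem bits_congr {k v w : Nat} (h : v % 2 ^ k = w % 2 ^ k) : bits k v = bits k w := by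
  induction k generalizing v w with
  | zero => rfl
  | succ k ih =>
    rw [Nat.pow_succ'] at h
    have hdvd : (2:Nat) ∣ 2 * 2 ^ k := Dvd.intro _ rfl
    have h1 : v % 2 = w % 2 := by
      rw [← Nat.mod_mod_of_dvd v hdvd, ← Nat.mod_mod_of_dvd w hdvd, h]
    have h2 : v / 2 % 2 ^ k = w / 2 % 2 ^ k := by
      rw [← Nat.mod_mul_right_div_self, ← Nat.mod_mul_right_div_self, h]
    simp [bits, ih h2, h1]

theorem bits_zero_cons {k v : Nat} (h : v < 2 ^ k) : bits (k + 1) v = '0' :: bits k v := by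
  induction k generalizing v with
  | zero => interval_cases v; rfl
  | succ k ih =>
    have h2 : v / 2 < 2 ^ k := by have := Nat.pow_succ 2 k; omega
    show bits (k+1) (v/2) ++ _ = '0' :: (bits k (v/2) ++ _)
    rw [ih h2]; rfl

theorem bits_one_cons {k v : Nat} (h1 : 2 ^ k ≤ v) (h2 : v < 2 ^ (k + 1)) :
    bits (k + 1) v = '1' :: bits k v := by
  induction k generalizing v with
  | zero => interval_cases v; rfl
  | succ k ih =>
    have hl : 2 ^ k ≤ v / 2 := by have := Nat.pow_succ 2 k; omega
    have hr : v / 2 < 2 ^ (k + 1) := by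
      have := Nat.pow_succ 2 k; have := Nat.pow_succ 2 (k+1); omega
    show bits (k+1+1) v = _
    show bits (k+1) (v/2) ++ _ = '1' :: (bits k (v/2) ++ _)
    rw [ih hl hr]; rfl

theorem bits_pad_zero {j k v : Nat} (hjk : j ≤ k) (hv : v < 2 ^ j) :
    bits k v = List.replicate (k - j) '0' ++ bits j v := by
  induction k with
  | zero => have : j = 0 := by omega
            subst this; rfl
  | succ k ih =>
    rcases Nat.lt_or_ge j (k+1) with h | h
    · have hvk : v < 2 ^ k := lt_of_lt_of_le hv (Nat.pow_le_pow_right (by omega) (by omega))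
      rw [bits_zero_cons hvk, ih (by omega)]
      have : k + 1 - j = (k - j) + 1 := by omega
      rw [this]; rfl
    · have : j = k + 1 := by omega
      subst this; simp

theorem bits_pad_one {j : Nat} (k : Nat) (hjk : j ≤ k) {m : Nat} (hm1 : 1 ≤ m)
    (hm2 : m ≤ 2 ^ j) :
    bits k (2 ^ k - m) = List.replicate (k - j) '1' ++ bits j (2 ^ j - m) := by
  induction k with
  | zero => have : j = 0 := by omega
            subst this; rfl
  | succ k ih =>
    rcases Nat.lt_or_ge j (k+1) with h | h
    · have hj2k : (2:Nat) ^ j ≤ 2 ^ k := Nat.pow_le_pow_right (by omega) (by omega)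
      have hks : (2:Nat) ^ (k+1) = 2 * 2 ^ k := by rw [Nat.pow_succ]; ring
      have h1 : 2 ^ k ≤ 2 ^ (k+1) - m := by omega
      have h2 : 2 ^ (k+1) - m < 2 ^ (k+1) := by
        have : (0:Nat) < 2 ^ (k+1) := Nat.two_pow_pos _; omega
      rw [bits_one_cons h1 h2]
      have hmod : (2 ^ (k+1) - m) % 2 ^ k = (2 ^ k - m) % 2 ^ k := by
        have he : 2 ^ (k+1) - m = 2 ^ k + (2 ^ k - m) := by omega
        rw [he, Nat.add_mod_left]
      rw [bits_congr hmod, ih (by omega)]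
      have : k + 1 - j = (k - j) + 1 := by omega
      rw [this]; rfl
    · have : j = k + 1 := by omega
      subst this; simp

-- binCore m is exactly the m.size low bits of m
theorem size_div_two (m : Nat) (hm : m ≠ 0) : m.size = (m / 2).size + 1 := by
  apply Nat.le_antisymm
  · apply Nat.size_le.2
    have h1 := Nat.lt_size_self (m / 2)
    have hp : (2:Nat) ^ ((m/2).size + 1) = 2 * 2 ^ (m/2).size := Nat.pow_succ' ..
    omega
  · show (m/2).size < m.size
    apply Nat.lt_size.2
    rcases Nat.eq_zero_or_pos (m/2).size with h | h
    · simp [h]; omega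
    · have h1 : 2 ^ ((m/2).size - 1) ≤ m / 2 := Nat.lt_size.1 (by omega)
      have hp : (2:Nat) ^ ((m/2).size - 1 + 1) = 2 * 2 ^ ((m/2).size - 1) := Nat.pow_succ' ..
      have he : (m/2).size - 1 + 1 = (m/2).size := by omega
      rw [← he]
      omega

theorem binCore_eq_bits (m : Nat) (hm : m ≠ 0) : binCore m = bits m.size m := by
  induction m using Nat.strong_induction_on with
  | _ m ih =>
    rw [binCore, if_neg hm, size_div_two m hm]
    show _ = bits (m/2).size (m/2) ++ _
    rcases Nat.eq_zero_or_pos (m / 2) with h | h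
    · rw [h]
      have : binCore 0 = [] := by rw [binCore]; simp
      rw [this]
      have : (0:Nat).size = 0 := Nat.size_zero
      rw [this]; rfl
    · rw [ih (m/2) (Nat.div_lt_self (by omega) (by omega)) (by omega)]

theorem binDigits_eq_bits (m : Nat) :
    binDigits m = if m = 0 then bits 1 0 else bits m.size m := by
  rcases Nat.eq_zero_or_pos m with h | h
  · subst h; rfl
  · rw [binDigits, if_neg (by omega), if_neg (by omega), binCore_eq_bits m (by omega)]

theorem length_binDigits (m : Nat) :
    (binDigits m).length = if m = 0 then 1 else m.size := by
  rw [binDigits_eq_bits]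
  split <;> simp [length_bits]

-- the padding while-loop is a replicate-prepend when the string is short enough
theorem padLoop_eq {c : Char} {n : Int} {s : List Char} (h : (s.length : Int) ≤ n) :
    padLoop c n s = List.replicate (n.toNat - s.length) c ++ s := by
  by_cases hlt : (s.length : Int) < n
  · rw [padLoop, if_pos hlt, padLoop_eq (by simp; omega)]
    have h1 : n.toNat - (c :: s).length = n.toNat - s.length - 1 := by simp; omega
    have h2 : n.toNat - s.length = (n.toNat - s.length - 1) + 1 := by
      simp only [List.length_cons] at *; omega
    rw [h1, h2, List.replicate_succ']
    simp
  · rw [padLoop, if_neg hlt]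
    have : n.toNat - s.length = 0 := by omega
    simp [this]
termination_by (n - s.length).toNat
decreasing_by simp only [List.length_cons]; omega

-- single-character replace is a character map
theorem replace_go_single (o e : Char) (fuel : Nat) (l acc : List Char)
    (h : l.length ≤ fuel) :
    PySem.Chars.replace.go [o] [e] fuel l acc =
      acc.reverse ++ l.map (fun c => if c = o then e else c) := by
  induction fuel generalizing l acc with
  | zero =>
    have : l = [] := by cases l <;> simp_all
    subst this
    simp [PySem.Chars.replace.go]
  | succ fuel ih =>
    cases l with
    | nil => simp [PySem.Chars.replace.go]
    | cons c t =>
      rw [PySem.Chars.replace.go]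
      by_cases hc : c = o
      · subst hc
        rw [if_pos (by simp [List.isPrefixOf])]
        rw [ih _ _ (by simp at h ⊢; omega)]
        simp
      · rw [if_neg (by simp [List.isPrefixOf]; exact fun hh => absurd hh.symm hc)]
        rw [ih _ _ (by simp at h ⊢; omega)]
        simp [hc]

theorem replace_single (s : List Char) (o e : Char) :
    PySem.Chars.replace s [o] [e] = s.map (fun c => if c = o then e else c) := by
  rw [PySem.Chars.replace, if_neg (by simp)]
  simpa using replace_go_single o e s.length s [] (le_refl _)

-- the three replaces of A invert each bit character
theorem triple_replace_eq_flip (s : List Char) (hs : ∀ c ∈ s, c = '0' ∨ c = '1') :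
    ((s.map (fun c => if c = '1' then '2' else c)).map
        (fun c => if c = '0' then '1' else c)).map
      (fun c => if c = '2' then '0' else c) =
      s.map (fun c => if c = '1' then '0' else '1') := by
  simp only [List.map_map]
  refine List.map_congr_left (fun c hc => ?_)
  rcases hs c hc with h | h <;> subst h <;> rfl

-- inverting the low k bits is subtracting from 2^k - 1
theorem flip_bits {k t : Nat} (h : t < 2 ^ k) :
    (bits k t).map (fun c => if c = '1' then '0' else '1') = bits k (2 ^ k - 1 - t) := by
  induction k generalizing t with
  | zero => rfl
  | succ k ih =>
    have hp : (2:Nat) ^ (k+1) = 2 * 2 ^ k := by rw [Nat.pow_succ]; ring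
    have ht2 : t / 2 < 2 ^ k := by omega
    show (bits k (t/2) ++ _).map _ = bits k ((2 ^ (k+1) - 1 - t) / 2) ++ _
    rw [List.map_append, ih ht2]
    have hd : (2 ^ (k+1) - 1 - t) / 2 = 2 ^ k - 1 - t / 2 := by omega
    have hm : (2 ^ (k+1) - 1 - t) % 2 = 1 - t % 2 := by omega
    rw [hd, hm]
    congr 1
    rcases Nat.mod_two_eq_zero_or_one t with h | h <;> simp [h]

-- zero-padding binDigits m to width k yields the low k bits of m (both programs' positive shape)
theorem pad_binDigits_eq_bits {m k : Nat} (hk : 1 ≤ k) (hm : m < 2 ^ k) :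
    List.replicate (k - (binDigits m).length) '0' ++ binDigits m = bits k m := by
  rcases Nat.eq_zero_or_pos m with h | h
  · subst h
    rw [binDigits_eq_bits]
    exact (bits_pad_zero hk (by omega)).symm
  · have hsz : m.size ≤ k := Nat.size_le.2 hm
    rw [binDigits_eq_bits, if_neg (by omega), length_bits]
    exact (bits_pad_zero hsz (Nat.lt_size_self m)).symm

theorem mem_binDigits {c : Char} {m : Nat} (h : c ∈ binDigits m) : c = '0' ∨ c = '1' := by
  rw [binDigits_eq_bits] at h
  split at h <;> exact mem_bits h

theorem binDigits_ne_nil (m : Nat) : binDigits m ≠ [] := by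
  intro h
  have hl := congrArg List.length h
  rw [length_binDigits] at hl
  simp only [List.length_nil] at hl
  split at hl
  · omega
  · exact absurd (Nat.size_eq_zero.1 hl) (by assumption)

theorem length_binDigits_le {m k : Nat} (hk : 1 ≤ k) (hm : m < 2 ^ k) :
    (binDigits m).length ≤ k := by
  rw [length_binDigits]
  split
  · omega
  · exact Nat.size_le.2 hm

-- zfill on a sign-free string is the same replicate-prepend as the padding loop
theorem zfill_nosign (l : List Char) (n : Int) (hl : l ≠ [])
    (h : ∀ c ∈ l, c = '0' ∨ c = '1') :
    PySem.Chars.zfill l n = List.replicate (n.toNat - l.length) '0' ++ l := by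
  rw [PySem.Chars.zfill.eq_def]
  by_cases hle : n ≤ (l.length : Int)
  · rw [if_pos hle]
    have : n.toNat - l.length = 0 := by omega
    simp [this]
  · rw [if_neg hle]
    cases l with
    | nil => exact absurd rfl hl
    | cons c t =>
      rcases h c (by simp) with hc | hc <;> subst hc <;> simp

-- both programs' common normal form: the low n bits of the two's-complement value
theorem alt_eq_bits {a n : Int} (hn : 1 ≤ n) (hlo : -(2 ^ n.toNat) ≤ a)
    (hhi : a < 2 ^ n.toNat) :
    decSign_alt a n =
      String.ofList (bits n.toNat (if 0 ≤ a then a else 2 ^ n.toNat + a).toNat) := by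
  have hpow : (((2:Nat) ^ n.toNat : Nat) : Int) = 2 ^ n.toNat := by push_cast; ring
  have hvnn : 0 ≤ (if 0 ≤ a then a else 2 ^ n.toNat + a) := by split <;> omega
  have hvlt : (if 0 ≤ a then a else 2 ^ n.toNat + a) < 2 ^ n.toNat := by split <;> omega
  set v : Int := if 0 ≤ a then a else 2 ^ n.toNat + a with hv
  have hwlt : v.toNat < 2 ^ n.toNat := by omega
  have hk : 1 ≤ n.toNat := by omega
  have hnv : ¬ v < 0 := by omega
  have hbr : (if a ≥ 0 then a else 2 ^ n.toNat + a) = v := by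
    simp only [hv, ge_iff_le]
  rw [decSign_alt, pyFormatBin, hbr, if_neg hnv, PySem.Str.zfill]
  congr 1
  rw [String.toList_ofList,
    zfill_nosign _ _ (binDigits_ne_nil _) (fun c hc => mem_binDigits hc)]
  exact pad_binDigits_eq_bits hk hwlt

-- ===== VERDICT (by name: the statement is the Claim_ definition above) =====
theorem decSign_spec : Claim_equal_decSign := by
  intro a n _ hpre
  obtain ⟨hn, hlo, hhi⟩ := hpre
  have hpow : (((2:Nat) ^ n.toNat : Nat) : Int) = 2 ^ n.toNat := by push_cast; ring
  have hk : 1 ≤ n.toNat := by omega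
  have hnk : (n.toNat : Int) = n := Int.toNat_of_nonneg (by omega)
  show decSign a n = decSign_alt a n
  rw [alt_eq_bits hn hlo hhi]
  by_cases ha : 0 ≤ a
  · -- a >= 0: the else-branch, zero padding
    have hab : a = (a.natAbs : Int) := (Int.natAbs_of_nonneg ha).symm
    have hwlt : a.natAbs < 2 ^ n.toNat := by omega
    rw [decSign]
    simp only [if_neg (not_not_intro hab), if_pos ha]
    congr 1
    rw [padLoop_eq (by have := length_binDigits_le hk hwlt; omega),
      pad_binDigits_eq_bits hk hwlt]
    congr 1
    omega
  · -- a < 0: bit inversion of bin(|a|-1) and one padding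
    have hm1 : 1 ≤ a.natAbs := by omega
    have hmle : a.natAbs ≤ 2 ^ n.toNat := by
      have : (a.natAbs : Int) = -a := by omega
      omega
    have hne : a ≠ (a.natAbs : Int) := by omega
    rw [decSign]
    simp only [if_pos hne, if_neg ha]
    have hone : (("1" : String).toList) = ['1'] := by decide
    have hzero : (("0" : String).toList) = ['0'] := by decide
    have htwo : (("2" : String).toList) = ['2'] := by decide
    simp only [PySem.Str.replace, String.toList_ofList, hone, hzero, htwo,
      replace_single]
    rw [triple_replace_eq_flip _ (fun c hc => mem_binDigits hc)]
    congr 1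
    -- value for B is 2^n + a, i.e. 2^n - |a| as a Nat
    have hw : (2 ^ n.toNat + a).toNat = 2 ^ n.toNat - a.natAbs := by omega
    rw [hw]
    rcases Nat.lt_or_ge a.natAbs 2 with h2 | h2
    · -- |a| = 1: bin(0) = "0" flips to "1"
      have hm : a.natAbs = 1 := by omega
      rw [hm]
      have hbd : (binDigits (1 - 1)).map (fun c => if c = '1' then '0' else '1') =
          bits 1 (2 ^ 1 - 1) := by decide
      rw [hbd, padLoop_eq (by rw [length_bits]; omega), length_bits,
        ← bits_pad_one n.toNat hk (by omega) (by decide)]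
    · -- |a| ≥ 2: bin(|a|-1) keeps its size-many bits, inverted then one-padded
      have ht1 : a.natAbs - 1 ≠ 0 := by omega
      have htlt : a.natAbs - 1 < 2 ^ (a.natAbs - 1).size := Nat.lt_size_self _
      have hszle : (a.natAbs - 1).size ≤ n.toNat := Nat.size_le.2 (by omega)
      have hszpos : 1 ≤ (a.natAbs - 1).size := by
        rcases Nat.eq_zero_or_pos (a.natAbs - 1).size with h | h
        · exact absurd (Nat.size_eq_zero.1 h) ht1
        · omega
      rw [binDigits, if_neg ht1, binCore_eq_bits _ ht1, flip_bits htlt,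
        padLoop_eq (by rw [length_bits]; omega), length_bits]
      have hflipval : 2 ^ (a.natAbs - 1).size - 1 - (a.natAbs - 1) =
          2 ^ (a.natAbs - 1).size - a.natAbs := by omega
      rw [hflipval, ← bits_pad_one n.toNat hszle hm1 (by omega)]
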